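-- pv_equiv track=rewrite | github.com/carolinecorbieres/ArtlasCatalogues | 2_OCR/1_eval_txt/score_and_correct_alto_comm_line.py | verifEntrelacement
-- ===== SOURCE A (Python) =====
-- def verifEntrelacement(L_bo_b,L_bf_b,L_bo_i,L_bf_i):
--     verif_b = [ u[1]<v[0] for u,v in zip(L_bo_b,L_bf_b)]
--     verif_i = [ u[1]<v[0] for u,v in zip(L_bo_i,L_bf_i)]
--     def not_between(Liste,Liste_o,Liste_f):
--         return [ not ( u[1]<x[0] and x[1]<v[0]) for x in Liste for u,v in zip(Liste_o,Liste_f)]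
--     verif_bo_i = not_between(L_bo_b,L_bo_i,L_bf_i) # <b> ne doit pas etre entre <i> et </i>
--     verif_bf_i = not_between(L_bf_b,L_bo_i,L_bf_i) # </b> ne doit pas etre entre <i> et </i>
--     verif_io_b = not_between(L_bo_i,L_bo_b,L_bf_b) # <i> ne doit pas etre entre <b> et </b>
--     verif_if_b = not_between(L_bf_i,L_bo_b,L_bf_b) # </i> ne doit pas etre entre <b> et </b>
--     return all([all(verif_b), all(verif_i), all(verif_bo_i),all(verif_bf_i),all(verif_io_b),all(verif_if_b)])  # all(list) = True si et seulement tous les éléments de list sont True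
-- ===== SOURCE B (Python) =====
-- def verifEntrelacement(L_bo_b, L_bf_b, L_bo_i, L_bf_i):
--     # ordering check: every opening tag ends before its closing tag starts
--     def ordered(Lo, Lf):
--         return all(u[1] < v[0] for u, v in zip(Lo, Lf))
--
--     # Is there a query point x strictly inside some interval (u, v) of zip(Lo, Lf),
--     # i.e. u[1] < x[0] and x[1] < v[0]?  Sort the intervals as (end-of-open, start-of-close)
--     # by the first coordinate, sort the queries by their first coordinate, and sweep:
--     # maintain the running maximum of start-of-close over intervals already passed.
--     def has_violation(Lo, Lf, queries):
--         pairs = sorted(((u[1], v[0]) for u, v in zip(Lo, Lf)), key=lambda t: t[0])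
--         qs = sorted(queries, key=lambda q: q[0])
--         m = None
--         i = 0
--         n = len(pairs)
--         for q0, q1 in qs:
--             while i < n and pairs[i][0] < q0:
--                 b = pairs[i][1]
--                 if m is None or b > m:
--                     m = b
--                 i += 1
--             if m is not None and m > q1:
--                 return True
--         return False
--
--     return (ordered(L_bo_b, L_bf_b)
--             and ordered(L_bo_i, L_bf_i)
--             and not has_violation(L_bo_i, L_bf_i, list(L_bo_b) + list(L_bf_b))
--             and not has_violation(L_bo_b, L_bf_b, list(L_bo_i) + list(L_bf_i)))
-- ===== Notes on version B (the rewrite author's own statement) =====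
-- stated objective: faster
-- what changed: A runs four quadratic all-pairs 'not between' scans (every tag position against every interval); B sorts the (open-end, close-start) interval pairs and the query points by coordinate once and answers each containment query with a single prefix-max sweep over both sorted lists.
import Mathlib
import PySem

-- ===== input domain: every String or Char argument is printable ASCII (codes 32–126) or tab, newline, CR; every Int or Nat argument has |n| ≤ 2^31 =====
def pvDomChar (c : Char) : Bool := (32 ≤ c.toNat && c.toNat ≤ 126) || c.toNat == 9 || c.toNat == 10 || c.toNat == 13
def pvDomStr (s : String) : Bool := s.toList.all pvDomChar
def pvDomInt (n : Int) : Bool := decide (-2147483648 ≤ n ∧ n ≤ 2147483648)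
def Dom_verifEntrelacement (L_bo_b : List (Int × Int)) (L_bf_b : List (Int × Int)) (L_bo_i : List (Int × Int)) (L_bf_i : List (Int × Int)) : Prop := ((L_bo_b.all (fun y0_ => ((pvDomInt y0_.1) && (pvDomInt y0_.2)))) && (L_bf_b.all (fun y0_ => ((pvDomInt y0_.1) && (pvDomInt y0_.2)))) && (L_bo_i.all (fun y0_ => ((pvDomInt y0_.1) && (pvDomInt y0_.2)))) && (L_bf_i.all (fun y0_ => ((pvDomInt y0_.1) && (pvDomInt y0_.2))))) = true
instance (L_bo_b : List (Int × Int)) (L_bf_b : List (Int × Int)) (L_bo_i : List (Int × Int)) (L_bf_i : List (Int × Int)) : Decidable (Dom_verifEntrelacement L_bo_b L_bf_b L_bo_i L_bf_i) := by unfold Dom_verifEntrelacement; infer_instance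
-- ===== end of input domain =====

-- B replaces A's quadratic all-pairs "not between" scans by sort + prefix-max sweep (asymptotically faster); same return value.


-- ===== PORT A =====
-- not_between(Liste, Liste_o, Liste_f): the nested comprehension as a flatMap of maps
def pvA_notBetween (Liste Lo Lf : List (Int × Int)) : List Bool :=
  Liste.flatMap (fun x => (Lo.zip Lf).map (fun uv => !(decide (uv.1.2 < x.1) && decide (x.2 < uv.2.1))))

def verifEntrelacement (L_bo_b : List (Int × Int)) (L_bf_b : List (Int × Int)) (L_bo_i : List (Int × Int)) (L_bf_i : List (Int × Int)) : Bool :=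
  let verif_b := (L_bo_b.zip L_bf_b).map (fun uv => decide (uv.1.2 < uv.2.1))
  let verif_i := (L_bo_i.zip L_bf_i).map (fun uv => decide (uv.1.2 < uv.2.1))
  let verif_bo_i := pvA_notBetween L_bo_b L_bo_i L_bf_i
  let verif_bf_i := pvA_notBetween L_bf_b L_bo_i L_bf_i
  let verif_io_b := pvA_notBetween L_bo_i L_bo_b L_bf_b
  let verif_if_b := pvA_notBetween L_bf_i L_bo_b L_bf_b
  ([verif_b.all id, verif_i.all id, verif_bo_i.all id, verif_bf_i.all id,
    verif_io_b.all id, verif_if_b.all id]).all id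

-- ===== PORT B =====
-- "if m is None or b > m: m = b"
def pvB_updMax (m : Option Int) (b : Int) : Option Int :=
  match m with
  | none => some b
  | some v => if b > v then some b else some v

-- "m is not None and m > q1"
def pvB_chk (m : Option Int) (q1 : Int) : Bool :=
  match m with
  | none => false
  | some v => decide (v > q1)

-- the for-loop over sorted queries with the inner while over sorted pairs (state m = running max)
def pvB_sweep : List (Int × Int) → List (Int × Int) → Option Int → Bool
  | _, [], _ => false
  | [], q :: qt, m => pvB_chk m q.2 || pvB_sweep [] qt m
  | p :: pt, q :: qt, m =>
    if p.1 < q.1 then pvB_sweep pt (q :: qt) (pvB_updMax m p.2)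
    else pvB_chk m q.2 || pvB_sweep (p :: pt) qt m
termination_by ps qs _ => ps.length + qs.length

def pvB_ordered (Lo Lf : List (Int × Int)) : Bool :=
  (Lo.zip Lf).all (fun uv => decide (uv.1.2 < uv.2.1))

def pvB_hasViolation (Lo Lf queries : List (Int × Int)) : Bool :=
  pvB_sweep
    (PySem.List.sorted ((Lo.zip Lf).map (fun uv => (uv.1.2, uv.2.1))) (fun t => t.1) false)
    (PySem.List.sorted queries (fun q => q.1) false)
    none

def verifEntrelacement_alt (L_bo_b : List (Int × Int)) (L_bf_b : List (Int × Int)) (L_bo_i : List (Int × Int)) (L_bf_i : List (Int × Int)) : Bool :=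
  pvB_ordered L_bo_b L_bf_b && pvB_ordered L_bo_i L_bf_i
    && !pvB_hasViolation L_bo_i L_bf_i (L_bo_b ++ L_bf_b)
    && !pvB_hasViolation L_bo_b L_bf_b (L_bo_i ++ L_bf_i)

-- ===== PRECONDITION & SPEC =====
def Spec_verifEntrelacement (L_bo_b : List (Int × Int)) (L_bf_b : List (Int × Int)) (L_bo_i : List (Int × Int)) (L_bf_i : List (Int × Int)) (out : Bool) : Prop := out = verifEntrelacement_alt L_bo_b L_bf_b L_bo_i L_bf_i
instance (L_bo_b : List (Int × Int)) (L_bf_b : List (Int × Int)) (L_bo_i : List (Int × Int)) (L_bf_i : List (Int × Int)) (out : Bool) : Decidable (Spec_verifEntrelacement L_bo_b L_bf_b L_bo_i L_bf_i out) := by unfold Spec_verifEntrelacement; infer_instance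

-- ===== CLAIM (what is proved, stated in full; the proofs are below) =====
def Claim_equal_verifEntrelacement : Prop := ∀ (L_bo_b : List (Int × Int)) (L_bf_b : List (Int × Int)) (L_bo_i : List (Int × Int)) (L_bf_i : List (Int × Int)), Dom_verifEntrelacement L_bo_b L_bf_b L_bo_i L_bf_i → Spec_verifEntrelacement L_bo_b L_bf_b L_bo_i L_bf_i (verifEntrelacement L_bo_b L_bf_b L_bo_i L_bf_i)

-- ===== LEMMAS AND PROOFS =====

theorem pv_exists_mem_congr {α : Type} {l : List α} {P R : α → Prop}
    (h : ∀ x ∈ l, (P x ↔ R x)) : (∃ x ∈ l, P x) ↔ ∃ x ∈ l, R x :=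
  ⟨fun ⟨x, hx, hp⟩ => ⟨x, hx, (h x hx).1 hp⟩, fun ⟨x, hx, hp⟩ => ⟨x, hx, (h x hx).2 hp⟩⟩

theorem pv_chk_updMax (m : Option Int) (b q1 : Int) :
    pvB_chk (pvB_updMax m b) q1 = (pvB_chk m q1 || decide (q1 < b)) := by
  cases m with
  | none => simp [pvB_updMax, pvB_chk]
  | some v =>
    simp only [pvB_updMax, pvB_chk]
    by_cases h : b > v <;> simp [h] <;> omega

theorem pv_sweep_iff (ps qs : List (Int × Int)) (m : Option Int)
    (hps : ps.Pairwise (fun a b => a.1 ≤ b.1)) (hqs : qs.Pairwise (fun a b => a.1 ≤ b.1)) :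
    (pvB_sweep ps qs m = true ↔
      ∃ q ∈ qs, pvB_chk m q.2 = true ∨ ∃ p ∈ ps, p.1 < q.1 ∧ q.2 < p.2) := by
  induction ps, qs, m using pvB_sweep.induct with
  | case1 ps m => simp [pvB_sweep]
  | case2 q qt m ih =>
    rw [List.pairwise_cons] at hqs
    simp only [pvB_sweep, Bool.or_eq_true, ih (by simp) hqs.2, List.mem_cons]
    constructor
    · rintro (h | ⟨r, hr, h⟩)
      · exact ⟨q, Or.inl rfl, Or.inl h⟩
      · exact ⟨r, Or.inr hr, h⟩
    · rintro ⟨r, (rfl | hr), (h | ⟨p, hp, _⟩)⟩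
      · exact Or.inl h
      · simp at hp
      · exact Or.inr ⟨r, hr, Or.inl h⟩
      · simp at hp
  | case3 p pt q qt m h ih =>
    rw [List.pairwise_cons] at hps
    simp only [pvB_sweep, if_pos h]
    rw [ih hps.2 hqs]
    apply pv_exists_mem_congr
    intro r hr
    have hqr : q.1 ≤ r.1 := by
      rcases List.mem_cons.1 hr with rfl | hr'
      · exact le_refl _
      · exact (List.pairwise_cons.1 hqs).1 r hr'
    rw [pv_chk_updMax]
    simp only [Bool.or_eq_true, decide_eq_true_eq, List.mem_cons]
    constructor
    · rintro ((hc | hb) | ⟨x, hx, hxr⟩)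
      · exact Or.inl hc
      · exact Or.inr ⟨p, Or.inl rfl, by omega, hb⟩
      · exact Or.inr ⟨x, Or.inr hx, hxr⟩
    · rintro (hc | ⟨x, (rfl | hx), hxr⟩)
      · exact Or.inl (Or.inl hc)
      · exact Or.inl (Or.inr hxr.2)
      · exact Or.inr ⟨x, hx, hxr⟩
  | case4 p pt q qt m h ih =>
    rw [List.pairwise_cons] at hqs
    have hnolt : ∀ x ∈ p :: pt, ¬ x.1 < q.1 := by
      intro x hx
      rcases List.mem_cons.1 hx with rfl | hx'
      · exact h
      · have := (List.pairwise_cons.1 hps).1 x hx'; omega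
    simp only [pvB_sweep, if_neg h, Bool.or_eq_true, ih hps hqs.2, List.mem_cons]
    constructor
    · rintro (hc | ⟨r, hr, hv⟩)
      · exact ⟨q, Or.inl rfl, Or.inl hc⟩
      · exact ⟨r, Or.inr hr, hv⟩
    · rintro ⟨r, (rfl | hr), (hc | ⟨x, hx, hxr⟩)⟩
      · exact Or.inl hc
      · exact absurd hxr.1 (hnolt x (List.mem_cons.2 hx))
      · exact Or.inr ⟨r, hr, Or.inl hc⟩
      · exact Or.inr ⟨r, hr, Or.inr ⟨x, hx, hxr⟩⟩

theorem pv_hasViolation_iff (Lo Lf queries : List (Int × Int)) :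
    (pvB_hasViolation Lo Lf queries = true ↔
      ∃ q ∈ queries, ∃ uv ∈ Lo.zip Lf, uv.1.2 < q.1 ∧ q.2 < uv.2.1) := by
  unfold pvB_hasViolation
  rw [pv_sweep_iff _ _ _ (PySem.List.sorted_pairwise _ _) (PySem.List.sorted_pairwise _ _)]
  simp only [pvB_chk, PySem.List.mem_sorted, List.mem_map]
  constructor
  · rintro ⟨q, hq, (h | ⟨pp, ⟨uv, huv, rfl⟩, hlt⟩)⟩
    · simp at h
    · exact ⟨q, hq, uv, huv, hlt⟩
  · rintro ⟨q, hq, uv, huv, hlt⟩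
    exact ⟨q, hq, Or.inr ⟨(uv.1.2, uv.2.1), ⟨uv, huv, rfl⟩, hlt⟩⟩

theorem pv_notBetween_iff (Liste Lo Lf : List (Int × Int)) :
    ((pvA_notBetween Liste Lo Lf).all id = true ↔
      ¬ ∃ q ∈ Liste, ∃ uv ∈ Lo.zip Lf, uv.1.2 < q.1 ∧ q.2 < uv.2.1) := by
  simp [pvA_notBetween, List.all_eq_true]
  constructor
  · intro h x y hq c d e f huv hlt
    have := h x y hq c d e f huv
    omega
  · intro h x y hq c d e f huv
    have := h x y hq c d e f huv
    by_cases hlt : d < x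
    · exact Or.inr (this hlt)
    · exact Or.inl (by omega)

-- ===== VERDICT (by name: the statement is the Claim_ definition above) =====
theorem verifEntrelacement_spec : Claim_equal_verifEntrelacement := by
  intro L_bo_b L_bf_b L_bo_i L_bf_i _
  unfold Spec_verifEntrelacement verifEntrelacement verifEntrelacement_alt
  rw [Bool.eq_iff_iff]
  simp only [List.all_cons, List.all_nil, Bool.and_eq_true, Bool.not_eq_true',
    Bool.and_true, id, List.all_map, pvB_ordered]
  rw [pv_notBetween_iff, pv_notBetween_iff, pv_notBetween_iff, pv_notBetween_iff]
  rw [Bool.eq_false_iff, Bool.eq_false_iff, Ne, Ne,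
    pv_hasViolation_iff, pv_hasViolation_iff]
  constructor
  · rintro ⟨hb, hi, h1, h2, h3, h4⟩
    refine ⟨⟨⟨hb, hi⟩, ?_⟩, ?_⟩
    · rintro ⟨q, hq, w⟩
      rcases List.mem_append.1 hq with hq | hq
      · exact h1 ⟨q, hq, w⟩
      · exact h2 ⟨q, hq, w⟩
    · rintro ⟨q, hq, w⟩
      rcases List.mem_append.1 hq with hq | hq
      · exact h3 ⟨q, hq, w⟩
      · exact h4 ⟨q, hq, w⟩
  · rintro ⟨⟨⟨hb, hi⟩, hI⟩, hB⟩
    refine ⟨hb, hi, ?_, ?_, ?_, ?_⟩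
    · rintro ⟨q, hq, w⟩; exact hI ⟨q, List.mem_append.2 (Or.inl hq), w⟩
    · rintro ⟨q, hq, w⟩; exact hI ⟨q, List.mem_append.2 (Or.inr hq), w⟩
    · rintro ⟨q, hq, w⟩; exact hB ⟨q, List.mem_append.2 (Or.inl hq), w⟩
    · rintro ⟨q, hq, w⟩; exact hB ⟨q, List.mem_append.2 (Or.inr hq), w⟩
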